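-- pv_equiv track=rewrite | github.com/mithindev/LEARNING-DSA | DSA/SET - 1/DSA-PYTHON/dfs.py | DFS
-- ===== SOURCE A (Python) =====
-- import copy
--
-- def posmovs(arr):
--     ind = []
--     lengthx = len(arr)
--     lengthy = len(arr[0])
--     for i in range(lengthx):
--         for j in range(lengthy):
--             if arr[i][j] == 0:
--                 ind.append(i)
--                 ind.append(j)
--                 break
--     posmoves = []
--     if ind[0] < lengthx - 1:
--         posmoves.append([ind[0] + 1, ind[1]])
--     if ind[1] < lengthy - 1:
--         posmoves.append([ind[0], ind[1] + 1])
--     if ind[0] > 0: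
--         posmoves.append([ind[0] - 1, ind[1]])
--     if ind[1] > 0:
--         posmoves.append([ind[0], ind[1] - 1])
--
--     return posmoves, ind
--
-- def is_equal_state(arr1, arr2):
--     return all(arr1[i][j] == arr2[i][j] for i in range(len(arr1)) for j in range(len(arr1[0])))
--
-- def DFS(arr, goal):
--     stack = [(arr, 0)]
--     visited = set()
--
--     while stack:
--         curr, depth = stack.pop()
--
--         if is_equal_state(curr, goal):
--             return curr
--
--         visited.add(tuple(map(tuple, curr)))
--
--         x, y = posmovs(curr)
--         for i in range(len(x)):
--             arr1 = copy.deepcopy(curr)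
--             arr1[x[i][0]][x[i][1]], arr1[y[0]][y[1]] = arr1[y[0]][y[1]], arr1[x[i][0]][x[i][1]]
--             if tuple(map(tuple, arr1)) not in visited:
--                 stack.append((arr1, depth + 1))
--
--     return None
-- ===== SOURCE B (Python) =====
-- def posmovs(arr):
--     ind = []
--     lengthx = len(arr)
--     lengthy = len(arr[0])
--     for i in range(lengthx):
--         for j in range(lengthy):
--             if arr[i][j] == 0:
--                 ind.append(i)
--                 ind.append(j)
--                 break
--     posmoves = []
--     if ind[0] < lengthx - 1:
--         posmoves.append([ind[0] + 1, ind[1]])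
--     if ind[1] < lengthy - 1:
--         posmoves.append([ind[0], ind[1] + 1])
--     if ind[0] > 0:
--         posmoves.append([ind[0] - 1, ind[1]])
--     if ind[1] > 0:
--         posmoves.append([ind[0], ind[1] - 1])
--     return posmoves, ind
--
--
-- def DFS(arr, goal):
--     # Layered frontier saturation of the reachable state set; each state is
--     # expanded at most once (marked when first seen), no stack, no depth counter.
--     # The answer depends only on whether goal is reachable, so traversal order
--     # does not change the returned value.
--     seen = {tuple(map(tuple, arr))}
--     frontier = [arr]
--     while frontier:
--         for s in frontier:
--             if s == goal:
--                 return s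
--         nxt = []
--         for s in frontier:
--             moves, blank = posmovs(s)
--             for mv in moves:
--                 t = [row[:] for row in s]
--                 t[mv[0]][mv[1]], t[blank[0]][blank[1]] = t[blank[0]][blank[1]], t[mv[0]][mv[1]]
--                 key = tuple(map(tuple, t))
--                 if key not in seen:
--                     seen.add(key)
--                     nxt.append(t)
--         frontier = nxt
--     return None
-- ===== Notes on version B (the rewrite author's own statement) =====
-- stated objective: faster
-- what changed: Replaces the depth-carrying LIFO stack search (visited marked on pop, states re-expanded when popped again, deepcopy per child) by layered frontier saturation of the reachable state set with marking on first encounter, so every state is expanded at most once; the result depends only on reachability of the goal, so the returned value is unchanged. …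
-- outside the precondition, e.g. on DFS([], [[1]]): A returns [], B raises IndexError; on DFS([[1, 2]], [[1, 2], [7]]): A returns [[1, 2]], B raises IndexError
import Mathlib
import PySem

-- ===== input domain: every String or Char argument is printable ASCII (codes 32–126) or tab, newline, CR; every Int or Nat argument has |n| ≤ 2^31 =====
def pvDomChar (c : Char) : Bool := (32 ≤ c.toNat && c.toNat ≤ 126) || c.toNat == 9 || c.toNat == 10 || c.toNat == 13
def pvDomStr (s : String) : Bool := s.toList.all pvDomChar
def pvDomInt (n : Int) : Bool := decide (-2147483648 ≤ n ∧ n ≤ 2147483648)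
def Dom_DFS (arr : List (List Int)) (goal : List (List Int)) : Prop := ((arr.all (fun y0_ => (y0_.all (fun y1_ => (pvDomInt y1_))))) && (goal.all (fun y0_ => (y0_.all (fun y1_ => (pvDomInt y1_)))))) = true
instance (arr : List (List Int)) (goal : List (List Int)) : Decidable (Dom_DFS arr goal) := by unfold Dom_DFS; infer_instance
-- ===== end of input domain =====

-- B replaces A's depth-carrying LIFO stack search (visited marked on pop, states re-expanded)
-- by layered frontier saturation with marking on first encounter, so each state is expanded
-- at most once (objective: faster by a constant factor; the theorems below prove only equality).

-- ===== PORT A =====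

-- shared helper: transliteration of posmovs (both Source A and Source B contain this helper verbatim).
-- Indices come from Python `range`, hence are ≥ 0: represented as Nat.
-- `getD … 1` models arr[i][j]: out-of-range access raises in Python (Pre_ keeps it in range).
def pmInd (s : List (List Int)) : List (Nat × Nat) :=
  (List.range s.length).foldl (fun acc i =>
    match (List.range (s.headD []).length).find? (fun j => (s.getD i []).getD j 1 == 0) with
    | some j => acc ++ [(i, j)]
    | none => acc) []

-- posmovs: `none` = Python's IndexError `ind[0]` when no cell is 0 (excluded by Pre_).
def posmovsL (s : List (List Int)) : Option (List (Nat × Nat) × (Nat × Nat)) :=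
  match pmInd s with
  | [] => none
  | (zi, zj) :: _ =>
    let n := s.length
    let m := (s.headD []).length
    some ((if zi + 1 < n then [(zi + 1, zj)] else []) ++
          (if zj + 1 < m then [(zi, zj + 1)] else []) ++
          (if 0 < zi then [(zi - 1, zj)] else []) ++
          (if 0 < zj then [(zi, zj - 1)] else []), (zi, zj))

def set2 (s : List (List Int)) (i j : Nat) (v : Int) : List (List Int) :=
  s.set i ((s.getD i []).set j v)

def get2 (s : List (List Int)) (i j : Nat) : Int := (s.getD i []).getD j 0

-- deepcopy of curr followed by the simultaneous swap of the move cell and the blank cell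
def applyMove (s : List (List Int)) (z mv : Nat × Nat) : List (List Int) :=
  set2 (set2 s mv.1 mv.2 (get2 s z.1 z.2)) z.1 z.2 (get2 s mv.1 mv.2)

-- the list of child states generated from s ([] when posmovs would raise; Pre_ excludes that)
def childs (s : List (List Int)) : List (List (List Int)) :=
  match posmovsL s with
  | none => []
  | some (x, z) => x.map (fun mv => applyMove s z mv)

-- is_equal_state: all(arr1[i][j] == arr2[i][j] …).  Distinct out-of-range defaults (0 vs 1)
-- keep out-of-range cells unequal; Python raises there and Pre_ keeps indices in range.
def eqState (a b : List (List Int)) : Bool :=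
  (List.range a.length).all fun i =>
    (List.range (a.headD []).length).all fun j =>
      (a.getD i []).getD j 0 == (b.getD i []).getD j 1

-- the while loop; head of the list = top of the Python stack (append+pop at the end),
-- so a block of pushes lands reversed at the head.  Fuel is a proved upper bound on the
-- number of iterations (the Python loop always terminates).
def loopA (goal : List (List Int)) :
    Nat → List (List (List Int) × Int) → List (List (List Int)) → Option (List (List Int))
  | 0, _, _ => none
  | _ + 1, [], _ => none
  | fuel + 1, (curr, d) :: rest, visited =>
    if eqState curr goal then some curr
    else
      let v' := PySem.Set.add visited curr
      loopA goal fuel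
        ((((childs curr).filter (fun t => !(PySem.Set.contains v' t))).map
            (fun t => (t, d + 1))).reverse ++ rest) v'

def DFS (arr : List (List Int)) (goal : List (List Int)) : Option (List (List Int)) :=
  loopA goal (5 * Nat.factorial (arr.length * (arr.headD []).length) + 5)
    [(arr, 0)] PySem.Set.empty

-- ===== PORT B =====

-- one candidate child: enqueue iff its key is unseen (seen and nxt grow together)
def bStep (acc : List (List (List Int)) × List (List (List Int))) (t : List (List Int)) :
    List (List (List Int)) × List (List (List Int)) :=
  if PySem.Set.contains acc.1 t then acc else (acc.1 ++ [t], acc.2 ++ [t])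

-- one frontier layer: expand every frontier state, collecting (seen', nxt)
def expandB (frontier seen : List (List (List Int))) :
    List (List (List Int)) × List (List (List Int)) :=
  frontier.foldl (fun acc s => (childs s).foldl bStep acc) (seen, [])

def loopB (goal : List (List Int)) :
    Nat → List (List (List Int)) → List (List (List Int)) → Option (List (List Int))
  | 0, _, _ => none
  | _ + 1, [], _ => none
  | fuel + 1, frontier@(_ :: _), seen =>
    match frontier.find? (fun s => s == goal) with
    | some s => some s
    | none =>
      let p := expandB frontier seen
      loopB goal fuel p.2 p.1

def DFS_alt (arr : List (List Int)) (goal : List (List Int)) : Option (List (List Int)) :=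
  loopB goal (Nat.factorial (arr.length * (arr.headD []).length) + 2)
    [arr] (PySem.Set.add PySem.Set.empty arr)

-- ===== PRECONDITION & SPEC =====

abbrev Rect (n m : Nat) (s : List (List Int)) : Prop :=
  s.length = n ∧ ∀ r ∈ s, r.length = m

-- Pre_ excludes inputs where A raises (ragged rows / no blank cell with arr ≠ goal: IndexError)
-- and shape-mismatched pairs, on which A's elementwise comparison is partial/vacuous and may
-- accidentally succeed (see cites in claim.json): it keeps equal-shape rectangular boards that
-- contain a blank (0) or are already equal to the goal.
def Pre_DFS (arr : List (List Int)) (goal : List (List Int)) : Prop :=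
  Rect arr.length (arr.headD []).length arr ∧
  Rect arr.length (arr.headD []).length goal ∧
  ((0 : Int) ∈ arr.flatten ∨ arr = goal)

instance (arr : List (List Int)) (goal : List (List Int)) : Decidable (Pre_DFS arr goal) := by
  unfold Pre_DFS; infer_instance

def pvWitness_DFS : List (List Int) × List (List Int) := ([[1, 0], [2, 3]], [[0, 1], [2, 3]])

def Spec_DFS (arr : List (List Int)) (goal : List (List Int)) (out : Option (List (List Int))) : Prop := out = DFS_alt arr goal
instance (arr : List (List Int)) (goal : List (List Int)) (out : Option (List (List Int))) : Decidable (Spec_DFS arr goal out) := by unfold Spec_DFS; infer_instance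

-- ===== CLAIM (what is proved, stated in full; the proofs are below) =====
def Claim_equal_DFS : Prop := ∀ (arr : List (List Int)) (goal : List (List Int)), Dom_DFS arr goal → Pre_DFS arr goal → Spec_DFS arr goal (DFS arr goal)

-- ===== LEMMAS AND PROOFS =====

-- the one-step successor relation of the puzzle and reachability from the start state
def stepR (s t : List (List Int)) : Prop := t ∈ childs s
def ReachP (a t : List (List Int)) : Prop := Relation.ReflTransGen stepR a t

-- ---- geometry of rectangular states ----

theorem flatten_len_aux {m : Nat} : ∀ {s : List (List Int)}, (∀ r ∈ s, r.length = m) →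
    s.flatten.length = s.length * m := by
  intro s
  induction s with
  | nil => simp
  | cons r t ih =>
    intro h
    simp only [List.flatten_cons, List.length_append, List.length_cons, Nat.succ_mul]
    rw [ih (fun r hr => h r (List.mem_cons_of_mem _ hr)), h r (List.mem_cons_self ..)]
    omega

theorem rect_flatten_length {n m : Nat} {s : List (List Int)} (h : Rect n m s) :
    s.flatten.length = n * m := by
  rw [flatten_len_aux h.2, h.1]
theorem rect_flatten_inj_aux {m : Nat} : ∀ (a b : List (List Int)),
    (∀ r ∈ a, r.length = m) → (∀ r ∈ b, r.length = m) → a.length = b.length →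
    a.flatten = b.flatten → a = b := by
  intro a
  induction a with
  | nil =>
    intro b _ _ hlen _
    cases b with
    | nil => rfl
    | cons r t => simp at hlen
  | cons r t ih =>
    intro b har hbr hlen h
    cases b with
    | nil => simp at hlen
    | cons r' t' =>
      simp only [List.flatten_cons] at h
      have hr : r.length = r'.length := by
        rw [har r (List.mem_cons_self ..), hbr r' (List.mem_cons_self ..)]
      obtain ⟨h1, h2⟩ := List.append_inj h hr
      rw [h1, ih t' (fun x hx => har x (List.mem_cons_of_mem _ hx))
        (fun x hx => hbr x (List.mem_cons_of_mem _ hx)) (by simpa using hlen) h2]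

theorem rect_flatten_inj {n m : Nat} {a b : List (List Int)}
    (ha : Rect n m a) (hb : Rect n m b) (h : a.flatten = b.flatten) : a = b :=
  rect_flatten_inj_aux a b ha.2 hb.2 (by rw [ha.1, hb.1]) h
theorem nodup_len_le_fact {n m : Nat} {F : List Int} {V : List (List (List Int))}
    (hn : V.Nodup) (hs : ∀ v ∈ V, Rect n m v ∧ v.flatten.Perm F) :
    V.length ≤ Nat.factorial (n * m) := by
  cases V with
  | nil => simp
  | cons v0 tl =>
    have hF : F.length = n * m := by
      have h0 := hs v0 (List.mem_cons_self ..)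
      rw [← h0.2.length_eq, rect_flatten_length h0.1]
    set V := v0 :: tl with hV
    have hmap : (V.map (·.flatten)).Nodup :=
      hn.map_on (fun x hx y hy hxy => rect_flatten_inj (hs x hx).1 (hs y hy).1 hxy)
    have hsub : ∀ w ∈ V.map (·.flatten), w ∈ F.permutations := by
      intro w hw
      obtain ⟨v, hv, rfl⟩ := List.mem_map.mp hw
      exact List.mem_permutations.mpr (hs v hv).2
    calc V.length = (V.map (·.flatten)).length := (List.length_map ..).symm
      _ = (V.map (·.flatten)).toFinset.card := (List.toFinset_card_of_nodup hmap).symm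
      _ ≤ F.permutations.toFinset.card := by
          apply Finset.card_le_card
          intro x hx
          exact List.mem_toFinset.mpr (hsub x (List.mem_toFinset.mp hx))
      _ ≤ F.permutations.length := List.toFinset_card_le _
      _ = Nat.factorial (n * m) := by rw [List.length_permutations, hF]
-- ---- swaps preserve shape and multiset ----

theorem getDcons_perm : ∀ (t : List Int) (j : Nat) (x : Int), j < t.length →
    ((t.getD j 0) :: t.set j x).Perm (x :: t) := by
  intro t
  induction t with
  | nil => intro j x hj; simp at hj
  | cons y t ih =>
    intro j x hj
    cases j with
    | zero => simpa using List.Perm.swap x y t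
    | succ j =>
      have hj' : j < t.length := by simpa using hj
      have e : ((y :: t).getD (j+1) 0) :: (y :: t).set (j+1) x
             = (t.getD j 0) :: y :: t.set j x := by simp
      rw [e]
      exact (List.Perm.swap y _ _).trans (((ih j x hj').cons y).trans (List.Perm.swap x y t))
theorem swap_perm_aux : ∀ (l : List Int) (p q : Nat), p < q → q < l.length →
    ((l.set p (l.getD q 0)).set q (l.getD p 0)).Perm l := by
  intro l
  induction l with
  | nil => intro p q _ hq; simp at hq
  | cons y t ih =>
    intro p q hpq hq
    cases p with
    | zero =>
      cases q with
      | zero => omega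
      | succ j =>
        have hj : j < t.length := by simpa using hq
        have e : (((y :: t).set 0 ((y :: t).getD (j+1) 0)).set (j+1) ((y :: t).getD 0 0))
               = (t.getD j 0) :: t.set j y := by simp
        rw [e]
        exact getDcons_perm t j y hj
    | succ i =>
      cases q with
      | zero => omega
      | succ j =>
        have e : (((y :: t).set (i+1) ((y :: t).getD (j+1) 0)).set (j+1) ((y :: t).getD (i+1) 0))
               = y :: ((t.set i (t.getD j 0)).set j (t.getD i 0)) := by simp
        rw [e]
        exact (ih i j (by omega) (by simpa using hq)).cons y

theorem swap_perm (l : List Int) (p q : Nat) (hp : p < l.length) (hq : q < l.length)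
    (hne : p ≠ q) : ((l.set p (l.getD q 0)).set q (l.getD p 0)).Perm l := by
  rcases Nat.lt_or_ge p q with h | h
  · exact swap_perm_aux l p q h hq
  · have h' : q < p := by omega
    rw [List.set_comm _ _ hne]
    exact swap_perm_aux l q p h' hp
theorem rect_set2 {n m : Nat} {s : List (List Int)} (h : Rect n m s)
    {i : Nat} (hi : i < s.length) (j : Nat) (v : Int) : Rect n m (set2 s i j v) := by
  constructor
  · simp [set2, h.1]
  · intro r hr
    rcases List.mem_or_eq_of_mem_set hr with hr' | rfl
    · exact h.2 r hr'
    · rw [List.length_set, List.getD_eq_getElem _ _ hi]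
      exact h.2 _ (List.getElem_mem hi)
theorem flatten_set2 {m : Nat} : ∀ {s : List (List Int)} {i : Nat},
    (∀ r ∈ s, r.length = m) → i < s.length → ∀ {j : Nat}, j < m → ∀ (v : Int),
    (set2 s i j v).flatten = s.flatten.set (i * m + j) v := by
  intro s
  induction s with
  | nil => intro i _ hi; simp at hi
  | cons r t ih =>
    intro i hm hi j hj v
    cases i with
    | zero =>
      have hr : r.length = m := hm r (List.mem_cons_self ..)
      simp only [set2, List.getD_cons_zero, List.set_cons_zero, List.flatten_cons,
        Nat.zero_mul, Nat.zero_add]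
      rw [List.set_append]
      simp [hr, hj]
    | succ i =>
      have hi' : i < t.length := by simpa using hi
      have hr : r.length = m := hm r (List.mem_cons_self ..)
      have e : set2 (r :: t) (i+1) j v = r :: set2 t i j v := by
        simp [set2]
      rw [e]
      simp only [List.flatten_cons]
      rw [ih (fun x hx => hm x (List.mem_cons_of_mem _ hx)) hi' hj v, List.set_append]
      have hnot : ¬ ((i+1) * m + j < r.length) := by
        rw [hr, Nat.succ_mul]; omega
      rw [if_neg hnot]
      congr 1
      rw [hr, Nat.succ_mul]
      congr 1
      omega
theorem get2_flatten {m : Nat} : ∀ {s : List (List Int)} {i : Nat},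
    (∀ r ∈ s, r.length = m) → i < s.length → ∀ {j : Nat}, j < m →
    get2 s i j = s.flatten.getD (i * m + j) 0 := by
  intro s
  induction s with
  | nil => intro i _ hi; simp at hi
  | cons r t ih =>
    intro i hm hi j hj
    have hr : r.length = m := hm r (List.mem_cons_self ..)
    cases i with
    | zero =>
      simp only [get2, List.getD_cons_zero, List.flatten_cons, Nat.zero_mul, Nat.zero_add]
      rw [List.getD_append _ _ _ _ (by omega)]
    | succ i =>
      have hi' : i < t.length := by simpa using hi
      simp only [get2, List.getD_cons_succ, List.flatten_cons]
      rw [List.getD_append_right _ _ _ _ (by rw [hr, Nat.succ_mul]; omega)]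
      have e : (i+1) * m + j - r.length = i * m + j := by rw [hr, Nat.succ_mul]; omega
      rw [e]
      exact ih (fun x hx => hm x (List.mem_cons_of_mem _ hx)) hi' hj
theorem idx_inj {m : Nat} {i1 j1 i2 j2 : Nat} (h1 : j1 < m) (h2 : j2 < m)
    (h : i1 * m + j1 = i2 * m + j2) : i1 = i2 ∧ j1 = j2 := by
  have hm : 0 < m := Nat.lt_of_le_of_lt (Nat.zero_le _) h1
  have h' : m * i1 + j1 = m * i2 + j2 := by
    rw [Nat.mul_comm m i1, Nat.mul_comm m i2]; exact h
  have hi : i1 = i2 := by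
    have := congrArg (· / m) h'
    simpa [Nat.mul_add_div hm, Nat.div_eq_of_lt h1, Nat.div_eq_of_lt h2] using this
  subst hi
  exact ⟨rfl, by omega⟩
-- ---- posmovs facts ----

theorem pm_foldl_aux (h : Nat → Option Nat) : ∀ (L : List Nat) (acc : List (Nat × Nat)),
    L.foldl (fun acc i => match h i with | some j => acc ++ [(i, j)] | none => acc) acc
      = acc ++ L.filterMap (fun i => (h i).map (fun j => (i, j))) := by
  intro L
  induction L with
  | nil => intro acc; simp
  | cons a L ih =>
    intro acc
    simp only [List.foldl_cons, List.filterMap_cons]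
    cases hh : h a with
    | none => simp [ih]
    | some j => simp [ih]

theorem pmInd_eq (s : List (List Int)) :
    pmInd s = (List.range s.length).filterMap (fun i =>
      ((List.range (s.headD []).length).find? (fun j => (s.getD i []).getD j 1 == 0)).map
        (fun j => (i, j))) := by
  unfold pmInd
  rw [pm_foldl_aux]
  simp

theorem posmovs_bounds {s : List (List Int)} {x : List (Nat × Nat)} {z : Nat × Nat}
    (h : posmovsL s = some (x, z)) :
    z.1 < s.length ∧ z.2 < (s.headD []).length ∧
    ∀ mv ∈ x, mv.1 < s.length ∧ mv.2 < (s.headD []).length ∧ mv ≠ z := by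
  unfold posmovsL at h
  cases hpm : pmInd s with
  | nil => rw [hpm] at h; simp at h
  | cons p tl =>
    obtain ⟨zi, zj⟩ := p
    rw [hpm] at h
    simp only [Option.some.injEq, Prod.mk.injEq] at h
    obtain ⟨hx, hz⟩ := h
    have hmem : (zi, zj) ∈ pmInd s := by rw [hpm]; exact List.mem_cons_self ..
    rw [pmInd_eq] at hmem
    obtain ⟨i, hi, hfind⟩ := List.mem_filterMap.mp hmem
    obtain ⟨j, hj, hje⟩ := Option.map_eq_some_iff.mp hfind
    have hij := Prod.mk.injEq .. |>.mp hje
    have hzi : zi < s.length := by rw [← hij.1]; exact List.mem_range.mp hi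
    have hzj : zj < (s.headD []).length := by
      rw [← hij.2]; exact List.mem_range.mp (List.mem_of_find?_eq_some hj)
    subst hz
    refine ⟨hzi, hzj, ?_⟩
    intro mv hmv
    rw [← hx] at hmv
    simp only [List.mem_append] at hmv
    rcases hmv with ((h1 | h2) | h3) | h4
    · by_cases c : zi + 1 < s.length
      · rw [if_pos c] at h1
        simp only [List.mem_singleton] at h1
        subst h1
        exact ⟨c, hzj, by simp [Prod.ext_iff]⟩
      · rw [if_neg c] at h1; simp at h1
    · by_cases c : zj + 1 < (s.headD []).length
      · rw [if_pos c] at h2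
        simp only [List.mem_singleton] at h2
        subst h2
        exact ⟨hzi, c, by simp [Prod.ext_iff]⟩
      · rw [if_neg c] at h2; simp at h2
    · by_cases c : 0 < zi
      · rw [if_pos c] at h3
        simp only [List.mem_singleton] at h3
        subst h3
        exact ⟨by omega, hzj, by simp [Prod.ext_iff]; omega⟩
      · rw [if_neg c] at h3; simp at h3
    · by_cases c : 0 < zj
      · rw [if_pos c] at h4
        simp only [List.mem_singleton] at h4
        subst h4
        exact ⟨hzi, by omega, by simp [Prod.ext_iff]; omega⟩
      · rw [if_neg c] at h4; simp at h4

theorem childs_length_le (s : List (List Int)) : (childs s).length ≤ 4 := by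
  unfold childs posmovsL
  cases hpm : pmInd s with
  | nil => simp
  | cons p tl =>
    obtain ⟨zi, zj⟩ := p
    simp only [List.length_map, List.length_append]
    split_ifs <;> simp

theorem cell_lt {n m i j : Nat} (hi : i < n) (hj : j < m) : i * m + j < n * m := by
  have h1 : i * m + j < (i + 1) * m := by rw [Nat.succ_mul]; omega
  exact Nat.lt_of_lt_of_le h1 (Nat.mul_le_mul_right m hi)

theorem childs_rect_perm {n m : Nat} {s t : List (List Int)} (hs : Rect n m s)
    (ht : t ∈ childs s) : Rect n m t ∧ t.flatten.Perm s.flatten := by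
  unfold childs at ht
  cases hp : posmovsL s with
  | none => rw [hp] at ht; simp at ht
  | some xz =>
    obtain ⟨x, z⟩ := xz
    rw [hp] at ht
    simp only [List.mem_map] at ht
    obtain ⟨mv, hmv, rfl⟩ := ht
    obtain ⟨hz1, hz2, hx⟩ := posmovs_bounds hp
    obtain ⟨hm1, hm2, hmz⟩ := hx mv hmv
    -- head row length is m (s is nonempty since z.1 < s.length)
    have hsne : s ≠ [] := by intro hh; rw [hh] at hz1; simp at hz1
    have hhead : (s.headD []).length = m := by
      cases s with
      | nil => exact absurd rfl hsne
      | cons r t' => exact hs.2 r (List.mem_cons_self ..)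
    rw [hhead] at hz2 hm2
    rw [hs.1] at hz1 hm1
    -- shapes
    have hslen : s.length = n := hs.1
    have hrect1 : Rect n m (set2 s mv.1 mv.2 (get2 s z.1 z.2)) :=
      rect_set2 hs (by omega) _ _
    have hrect : Rect n m (applyMove s z mv) := by
      unfold applyMove
      exact rect_set2 hrect1 (by rw [hrect1.1]; omega) _ _
    refine ⟨hrect, ?_⟩
    -- multiset
    have hF := rect_flatten_length hs
    have P := mv.1 * m + mv.2
    have hfl1 : (set2 s mv.1 mv.2 (get2 s z.1 z.2)).flatten
        = s.flatten.set (mv.1 * m + mv.2) (get2 s z.1 z.2) :=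
      flatten_set2 hs.2 (by omega) hm2 _
    have hfl2 : (applyMove s z mv).flatten
        = (s.flatten.set (mv.1 * m + mv.2) (get2 s z.1 z.2)).set (z.1 * m + z.2)
            (get2 s mv.1 mv.2) := by
      unfold applyMove
      rw [flatten_set2 hrect1.2 (by rw [hrect1.1]; omega) hz2 _, hfl1]
    have hg1 : get2 s z.1 z.2 = s.flatten.getD (z.1 * m + z.2) 0 :=
      get2_flatten hs.2 (by omega) hz2
    have hg2 : get2 s mv.1 mv.2 = s.flatten.getD (mv.1 * m + mv.2) 0 :=
      get2_flatten hs.2 (by omega) hm2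
    rw [hfl2, hg1, hg2]
    apply swap_perm
    · rw [hF]; exact cell_lt (by omega) hm2
    · rw [hF]; exact cell_lt (by omega) hz2
    · intro hc
      obtain ⟨e1, e2⟩ := idx_inj hm2 hz2 hc
      exact hmz (Prod.ext e1 e2)

-- ---- equality test ----

theorem eqState_refl {n m : Nat} {c : List (List Int)} (h : Rect n m c) :
    eqState c c = true := by
  unfold eqState
  simp only [List.all_eq_true, List.mem_range]
  intro i hi j hj
  have hne : c ≠ [] := by intro hh; rw [hh] at hi; simp at hi
  have hhead : (c.headD []).length = m := by
    cases c with
    | nil => exact absurd rfl hne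
    | cons r t => exact h.2 r (List.mem_cons_self ..)
  have hrow : (c.getD i []).length = m := by
    rw [List.getD_eq_getElem _ _ hi]
    exact h.2 _ (List.getElem_mem hi)
  rw [hhead] at hj
  rw [List.getD_eq_getElem _ 0 (by omega), List.getD_eq_getElem _ 1 (by omega)]
  simp

theorem eqState_iff {n m : Nat} {a b : List (List Int)} (ha : Rect n m a) (hb : Rect n m b) :
    eqState a b = true ↔ a = b := by
  constructor
  · intro h
    unfold eqState at h
    simp only [List.all_eq_true, List.mem_range] at h
    apply List.ext_getElem (by rw [ha.1, hb.1])
    intro i hia hib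
    have hra : a[i].length = m := ha.2 _ (List.getElem_mem hia)
    have hrb : b[i].length = m := hb.2 _ (List.getElem_mem hib)
    apply List.ext_getElem (by rw [hra, hrb])
    intro j hja hjb
    have hane : a ≠ [] := by intro hh; rw [hh] at hia; simp at hia
    have hhead : (a.headD []).length = m := by
      cases a with
      | nil => exact absurd rfl hane
      | cons r t => exact ha.2 r (List.mem_cons_self ..)
    have := h i hia j (by rw [hhead]; omega)
    rw [List.getD_eq_getElem _ [] hia, List.getD_eq_getElem _ [] (by rw [hb.1, ← ha.1]; exact hia)] at this
    rw [List.getD_eq_getElem _ 0 (by omega), List.getD_eq_getElem _ 1 (by rw [hrb]; omega)] at this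
    exact beq_iff_eq.mp this
  · intro h
    subst h
    exact eqState_refl ha

-- ---- closure argument ----

theorem reach_subset_closed {arr : List (List Int)} {V : List (List (List Int))}
    (hstart : arr ∈ V) (hcl : ∀ v ∈ V, ∀ t ∈ childs v, t ∈ V) :
    ∀ t, ReachP arr t → t ∈ V := by
  intro t h
  induction h with
  | refl => exact hstart
  | tail _ hbc ih => exact hcl _ ih _ hbc
-- ---- Set bridging ----

theorem set_add_mem {V : List (List (List Int))} {x : List (List Int)} (h : x ∈ V) :
    PySem.Set.add V x = V := by
  simp [PySem.Set.add, PySem.Set.contains, h]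
theorem set_add_not_mem {V : List (List (List Int))} {x : List (List Int)} (h : x ∉ V) :
    PySem.Set.add V x = V ++ [x] := by
  simp [PySem.Set.add, PySem.Set.contains, h]
-- ---- invariants ----

structure InvA (n m : Nat) (F : List Int) (arr goal : List (List Int))
    (stack : List (List (List Int) × Int)) (V : List (List (List Int))) : Prop where
  reach : ∀ p ∈ stack, ReachP arr p.1
  vGoal : ∀ v ∈ V, v ≠ goal
  start : (∃ p ∈ stack, p.1 = arr) ∨ arr ∈ V
  nodup : V.Nodup
  shapeS : ∀ p ∈ stack, Rect n m p.1 ∧ p.1.flatten.Perm F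
  shapeV : ∀ v ∈ V, Rect n m v ∧ v.flatten.Perm F
  pos : ∀ pre e post, stack = pre ++ e :: post → e.1 ∈ V →
    ∀ t ∈ childs e.1, t ∈ V ∨ ∃ q ∈ pre, q.1 = t
  closed : ∀ v ∈ V, ∀ t ∈ childs v, t ∈ V ∨ ∃ q ∈ stack, q.1 = t

structure InvB (n m : Nat) (F : List Int) (arr goal : List (List Int))
    (frontier seen : List (List (List Int))) : Prop where
  reach : ∀ s ∈ frontier, ReachP arr s
  sub : ∀ s ∈ frontier, s ∈ seen
  start : arr ∈ seen
  nodup : seen.Nodup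
  shape : ∀ v ∈ seen, Rect n m v ∧ v.flatten.Perm F
  closedOr : ∀ v ∈ seen, v ∈ frontier ∨ (v ≠ goal ∧ ∀ t ∈ childs v, t ∈ seen)

theorem lemA_empty {n m : Nat} {F : List Int} {arr goal : List (List Int)}
    {V : List (List (List Int))} (inv : InvA n m F arr goal [] V) : ¬ ReachP arr goal := by
  intro hR
  have hstart : arr ∈ V := by
    rcases inv.start with ⟨p, hp, _⟩ | h
    · simp at hp
    · exact h
  have hcl : ∀ v ∈ V, ∀ t ∈ childs v, t ∈ V := by
    intro v hv t ht
    rcases inv.closed v hv t ht with h | ⟨q, hq, _⟩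
    · exact h
    · simp at hq
  exact inv.vGoal goal (reach_subset_closed hstart hcl goal hR) rfl

theorem lemA {n m : Nat} {F : List Int} {arr goal : List (List Int)}
    (hg : Rect n m goal) :
    ∀ fuel (stack : List (List (List Int) × Int)) (V : List (List (List Int))),
    InvA n m F arr goal stack V →
    (Nat.factorial (n * m) - V.length) * 5 + stack.length ≤ fuel →
    (loopA goal fuel stack V = some goal ∧ ReachP arr goal) ∨
    (loopA goal fuel stack V = none ∧ ¬ ReachP arr goal) := by
  intro fuel
  induction fuel with
  | zero =>
    intro stack V inv hμ
    cases stack with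
    | nil => right; exact ⟨rfl, lemA_empty inv⟩
    | cons hd rest => simp at hμ
  | succ f ih =>
    intro stack V inv hμ
    cases stack with
    | nil => right; exact ⟨rfl, lemA_empty inv⟩
    | cons hd rest =>
      obtain ⟨curr, d⟩ := hd
      have hcd := inv.shapeS (curr, d) (List.mem_cons_self ..)
      by_cases he : eqState curr goal = true
      · have hceq : curr = goal := (eqState_iff hcd.1 hg).mp he
        left
        refine ⟨?_, hceq ▸ inv.reach (curr, d) (List.mem_cons_self ..)⟩
        have : loopA goal (f + 1) ((curr, d) :: rest) V = some curr := by
          simp [loopA, he]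
        rw [this, hceq]
      · have hne : curr ≠ goal := fun hh => he (by rw [hh]; exact eqState_refl hg)
        have hstep : loopA goal (f + 1) ((curr, d) :: rest) V =
            loopA goal f
              ((((childs curr).filter
                  (fun t => !(PySem.Set.contains (PySem.Set.add V curr) t))).map
                (fun t => (t, d + 1))).reverse ++ rest) (PySem.Set.add V curr) := by
          simp [loopA, he]
        rw [hstep]
        by_cases hv : curr ∈ V
        · -- curr already visited: by the positional invariant nothing is pushed
          rw [set_add_mem hv]
          have hch : ∀ t ∈ childs curr, t ∈ V := by
            intro t ht
            rcases inv.pos [] (curr, d) rest rfl hv t ht with h | ⟨q, hq, _⟩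
            · exact h
            · simp at hq
          have hfil : (childs curr).filter (fun t => !(PySem.Set.contains V t)) = [] :=
            List.filter_eq_nil_iff.mpr (fun t ht => by simp [hch t ht])
          rw [hfil]
          simp only [List.map_nil, List.reverse_nil, List.nil_append]
          refine ih rest V ?_ (by simp at hμ; omega)
          constructor
          · exact fun p hp => inv.reach p (List.mem_cons_of_mem _ hp)
          · exact inv.vGoal
          · rcases inv.start with ⟨p, hp, hpe⟩ | h
            · rcases List.mem_cons.mp hp with rfl | hp'
              · exact Or.inr (hpe ▸ hv)
              · exact Or.inl ⟨p, hp', hpe⟩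
            · exact Or.inr h
          · exact inv.nodup
          · exact fun p hp => inv.shapeS p (List.mem_cons_of_mem _ hp)
          · exact inv.shapeV
          · intro pre e post hsp hev t ht
            rcases inv.pos ((curr, d) :: pre) e post (by rw [hsp]; rfl) hev t ht with
              h | ⟨q, hq, hqe⟩
            · exact Or.inl h
            · rcases List.mem_cons.mp hq with rfl | hq'
              · exact Or.inl (hqe ▸ hv)
              · exact Or.inr ⟨q, hq', hqe⟩
          · intro v hv' t ht
            rcases inv.closed v hv' t ht with h | ⟨q, hq, hqe⟩
            · exact Or.inl h
            · rcases List.mem_cons.mp hq with rfl | hq'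
              · exact Or.inl (hqe ▸ hv)
              · exact Or.inr ⟨q, hq', hqe⟩
        · -- curr is new: push its unvisited children
          rw [set_add_not_mem hv]
          have hpush_mem : ∀ t,
              t ∈ (childs curr).filter
                (fun u => !(PySem.Set.contains (V ++ [curr]) u)) ↔
              t ∈ childs curr ∧ ¬ t ∈ V ++ [curr] := by
            intro t; simp [List.mem_filter, PySem.Set.contains]
          have hdich : ∀ t ∈ childs curr, t ∈ V ++ [curr] ∨
              t ∈ (childs curr).filter
                (fun u => !(PySem.Set.contains (V ++ [curr]) u)) := by
            intro t ht
            by_cases hx : t ∈ V ++ [curr]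
            · exact Or.inl hx
            · exact Or.inr ((hpush_mem t).mpr ⟨ht, hx⟩)
          set pushed := (childs curr).filter
            (fun u => !(PySem.Set.contains (V ++ [curr]) u)) with hpdef
          set A := (pushed.map (fun t => (t, d + 1))).reverse with hAdef
          have hmemA : ∀ p, p ∈ A ↔ ∃ t ∈ pushed, p = (t, d + 1) := by
            intro p
            simp only [hAdef, List.mem_reverse, List.mem_map]
            constructor
            · rintro ⟨t, ht, rfl⟩; exact ⟨t, ht, rfl⟩
            · rintro ⟨t, ht, rfl⟩; exact ⟨t, ht, rfl⟩
          refine ih (A ++ rest) (V ++ [curr]) ?_ ?_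
          · constructor
            · intro p hp
              rcases List.mem_append.mp hp with h | h
              · obtain ⟨t, ht, rfl⟩ := (hmemA p).mp h
                exact Relation.ReflTransGen.tail
                  (inv.reach (curr, d) (List.mem_cons_self ..)) ((hpush_mem t).mp ht).1
              · exact inv.reach p (List.mem_cons_of_mem _ h)
            · intro v hv'
              rcases List.mem_append.mp hv' with h | h
              · exact inv.vGoal v h
              · exact (List.mem_singleton.mp h) ▸ hne
            · rcases inv.start with ⟨p, hp, hpe⟩ | h
              · rcases List.mem_cons.mp hp with rfl | hp'
                · exact Or.inr (List.mem_append_right _ (by simp [← hpe]))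
                · exact Or.inl ⟨p, List.mem_append_right _ hp', hpe⟩
              · exact Or.inr (List.mem_append_left _ h)
            · rw [List.nodup_append]
              exact ⟨inv.nodup, List.nodup_singleton _, fun a ha b hb => by
                rw [List.mem_singleton.mp hb]; exact fun hab => hv (hab ▸ ha)⟩
            · intro p hp
              rcases List.mem_append.mp hp with h | h
              · obtain ⟨t, ht, rfl⟩ := (hmemA p).mp h
                obtain ⟨hr, hperm⟩ := childs_rect_perm hcd.1 ((hpush_mem t).mp ht).1
                exact ⟨hr, hperm.trans hcd.2⟩
              · exact inv.shapeS p (List.mem_cons_of_mem _ h)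
            · intro v hv'
              rcases List.mem_append.mp hv' with h | h
              · exact inv.shapeV v h
              · exact (List.mem_singleton.mp h) ▸ hcd
            · intro pre e post hsp hev t ht
              rcases List.append_eq_append_iff.mp hsp with ⟨l', hpre_eq, hrest_eq⟩ |
                ⟨l', hA_eq, hpost_eq⟩
              · -- e lies in rest
                rcases List.mem_append.mp hev with hev' | hev'
                · rcases inv.pos ((curr, d) :: l') e post (by rw [hrest_eq]; rfl) hev' t ht
                    with h | ⟨q, hq, hqe⟩
                  · exact Or.inl (List.mem_append_left _ h)
                  · rcases List.mem_cons.mp hq with rfl | hq'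
                    · exact Or.inl (List.mem_append_right _ (by simp [← hqe]))
                    · exact Or.inr ⟨q, by rw [hpre_eq]; exact List.mem_append_right _ hq', hqe⟩
                · have hec : e.1 = curr := List.mem_singleton.mp hev'
                  rcases hdich t (hec ▸ ht) with h | h
                  · exact Or.inl h
                  · refine Or.inr ⟨(t, d + 1), ?_, rfl⟩
                    rw [hpre_eq]
                    exact List.mem_append_left _ ((hmemA _).mpr ⟨t, h, rfl⟩)
              · cases l' with
                | nil =>
                  simp only [List.nil_append] at hpost_eq
                  rcases List.mem_append.mp hev with hev' | hev'
                  · rcases inv.pos [(curr, d)] e post (by rw [← hpost_eq]; rfl) hev' t ht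
                      with h | ⟨q, hq, hqe⟩
                    · exact Or.inl (List.mem_append_left _ h)
                    · have : q = (curr, d) := List.mem_singleton.mp hq
                      exact Or.inl (List.mem_append_right _ (by simp [← hqe, this]))
                  · have hec : e.1 = curr := List.mem_singleton.mp hev'
                    rcases hdich t (hec ▸ ht) with h | h
                    · exact Or.inl h
                    · refine Or.inr ⟨(t, d + 1), ?_, rfl⟩
                      have : (t, d + 1) ∈ A := (hmemA _).mpr ⟨t, h, rfl⟩
                      rw [hA_eq] at this
                      simpa using this
                | cons a l'' =>
                  have hea : e = a := (List.cons.injEq .. |>.mp hpost_eq).1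
                  have haA : a ∈ A := by rw [hA_eq]; simp
                  obtain ⟨t', ht', hta⟩ := (hmemA a).mp haA
                  have : e.1 ∈ pushed := by rw [hea, hta]; exact ht'
                  exact absurd hev ((hpush_mem e.1).mp this).2
            · intro v hv' t ht
              rcases List.mem_append.mp hv' with h | h
              · rcases inv.closed v h t ht with h' | ⟨q, hq, hqe⟩
                · exact Or.inl (List.mem_append_left _ h')
                · rcases List.mem_cons.mp hq with rfl | hq'
                  · exact Or.inl (List.mem_append_right _ (by simp [← hqe]))
                  · exact Or.inr ⟨q, List.mem_append_right _ hq', hqe⟩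
              · have hvc : v = curr := List.mem_singleton.mp h
                rcases hdich t (hvc ▸ ht) with h' | h'
                · exact Or.inl h'
                · exact Or.inr ⟨(t, d + 1), List.mem_append_left _ ((hmemA _).mpr ⟨t, h', rfl⟩), rfl⟩
          · -- the measure decreases
            have hbound : V.length + 1 ≤ Nat.factorial (n * m) := by
              have hnd : (V ++ [curr]).Nodup := by
                rw [List.nodup_append]
                exact ⟨inv.nodup, List.nodup_singleton _, fun a ha b hb => by
                  rw [List.mem_singleton.mp hb]; exact fun hab => hv (hab ▸ ha)⟩
              have hsh : ∀ v ∈ V ++ [curr], Rect n m v ∧ v.flatten.Perm F := by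
                intro v hv'
                rcases List.mem_append.mp hv' with h | h
                · exact inv.shapeV v h
                · exact (List.mem_singleton.mp h) ▸ hcd
              have := nodup_len_le_fact hnd hsh
              simpa using this
            have hplen : pushed.length ≤ 4 :=
              le_trans (List.length_filter_le _ _) (childs_length_le curr)
            have hAlen : A.length = pushed.length := by simp [hAdef]
            simp only [List.length_append, List.length_cons, hAlen] at hμ ⊢
            omega

theorem lemB_empty {n m : Nat} {F : List Int} {arr goal : List (List Int)}
    {seen : List (List (List Int))} (inv : InvB n m F arr goal [] seen) :
    ¬ ReachP arr goal := by
  intro hR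
  have hcl : ∀ v ∈ seen, ∀ t ∈ childs v, t ∈ seen := by
    intro v hv t ht
    rcases inv.closedOr v hv with h | ⟨_, h⟩
    · simp at h
    · exact h t ht
  have hgl : goal ∈ seen := reach_subset_closed inv.start hcl goal hR
  rcases inv.closedOr goal hgl with h | ⟨h, _⟩
  · simp at h
  · exact h rfl

theorem expand_inner : ∀ (cs : List (List (List Int))) (sn nx : List (List (List Int))),
    ∃ add, cs.foldl bStep (sn, nx) = (sn ++ add, nx ++ add) ∧
    (∀ t ∈ add, t ∈ cs) ∧ (∀ t ∈ cs, t ∈ sn ++ add) ∧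
    (sn.Nodup → (sn ++ add).Nodup) := by
  intro cs
  induction cs with
  | nil => intro sn nx; exact ⟨[], by simp, by simp, by simp, by simp⟩
  | cons t cs ih =>
    intro sn nx
    by_cases hc : t ∈ sn
    · have hb : bStep (sn, nx) t = (sn, nx) := by
        simp [bStep, hc]
      obtain ⟨add, he, hsrc, hcov, hnd⟩ := ih sn nx
      refine ⟨add, by simpa [hb] using he, ?_, ?_, hnd⟩
      · intro u hu; exact List.mem_cons_of_mem _ (hsrc u hu)
      · intro u hu
        rcases List.mem_cons.mp hu with rfl | hu'
        · exact List.mem_append_left _ hc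
        · exact hcov u hu'
    · have hb : bStep (sn, nx) t = (sn ++ [t], nx ++ [t]) := by
        simp [bStep, hc]
      obtain ⟨add, he, hsrc, hcov, hnd⟩ := ih (sn ++ [t]) (nx ++ [t])
      refine ⟨t :: add, ?_, ?_, ?_, ?_⟩
      · rw [List.foldl_cons, hb, he]; simp
      · intro u hu
        rcases List.mem_cons.mp hu with rfl | hu'
        · exact List.mem_cons_self ..
        · exact List.mem_cons_of_mem _ (hsrc u hu')
      · intro u hu
        rcases List.mem_cons.mp hu with rfl | hu'
        · have : u ∈ sn ++ [u] := List.mem_append_right _ (List.mem_singleton.mpr rfl)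
          simpa using Or.inl (Or.inr (List.mem_singleton.mpr rfl))
        · have := hcov u hu'
          simpa using this
      · intro hs
        have h1 : (sn ++ [t]).Nodup := by
          rw [List.nodup_append]
          exact ⟨hs, List.nodup_singleton t, fun a ha b hb => by
            rw [List.mem_singleton.mp hb]; intro hab; exact hc (hab ▸ ha)⟩
        have := hnd h1
        simpa using this

theorem expand_outer : ∀ (fr : List (List (List Int))) (sn nx : List (List (List Int))),
    ∃ add, fr.foldl (fun acc s => (childs s).foldl bStep acc) (sn, nx) =
      (sn ++ add, nx ++ add) ∧
    (∀ t ∈ add, ∃ s ∈ fr, t ∈ childs s) ∧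
    (∀ s ∈ fr, ∀ t ∈ childs s, t ∈ sn ++ add) ∧
    (sn.Nodup → (sn ++ add).Nodup) := by
  intro fr
  induction fr with
  | nil => intro sn nx; exact ⟨[], by simp, by simp, by simp, by simp⟩
  | cons s fr ih =>
    intro sn nx
    obtain ⟨add1, he1, hsrc1, hcov1, hnd1⟩ := expand_inner (childs s) sn nx
    obtain ⟨add2, he2, hsrc2, hcov2, hnd2⟩ := ih (sn ++ add1) (nx ++ add1)
    refine ⟨add1 ++ add2, ?_, ?_, ?_, ?_⟩
    · rw [List.foldl_cons, he1, he2]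
      simp [List.append_assoc]
    · intro u hu
      rcases List.mem_append.mp hu with h | h
      · exact ⟨s, List.mem_cons_self .., hsrc1 u h⟩
      · obtain ⟨s', hs', hch⟩ := hsrc2 u h
        exact ⟨s', List.mem_cons_of_mem _ hs', hch⟩
    · intro s' hs' t ht
      rcases List.mem_cons.mp hs' with rfl | hs''
      · have := hcov1 t ht
        rw [← List.append_assoc]
        exact List.mem_append_left _ this
      · have := hcov2 s' hs'' t ht
        simpa [List.append_assoc] using this
    · intro hs
      have := hnd2 (hnd1 hs)
      simpa [List.append_assoc] using this

theorem loopB_nil (goal : List (List Int)) :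
    ∀ fuel seen, loopB goal fuel [] seen = none := by
  intro fuel seen
  cases fuel <;> rfl

theorem lemB {n m : Nat} {F : List Int} {arr goal : List (List Int)} :
    ∀ fuel (frontier seen : List (List (List Int))),
    InvB n m F arr goal frontier seen →
    Nat.factorial (n * m) + 2 ≤ fuel + seen.length →
    (loopB goal fuel frontier seen = some goal ∧ ReachP arr goal) ∨
    (loopB goal fuel frontier seen = none ∧ ¬ ReachP arr goal) := by
  intro fuel
  induction fuel with
  | zero =>
    intro frontier seen inv hμ
    have := nodup_len_le_fact inv.nodup inv.shape
    omega
  | succ f ih =>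
    intro frontier seen inv hμ
    cases frontier with
    | nil => right; exact ⟨loopB_nil goal _ _, lemB_empty inv⟩
    | cons s0 fr =>
      cases hfind : (s0 :: fr).find? (fun s => s == goal) with
      | some s =>
        have hsg : s = goal := by
          have := List.find?_some hfind
          exact beq_iff_eq.mp this
        have hmem : s ∈ s0 :: fr := List.mem_of_find?_eq_some hfind
        left
        constructor
        · simp only [loopB, hfind]; rw [hsg]
        · exact hsg ▸ inv.reach s hmem
      | none =>
        have hng : ∀ s ∈ s0 :: fr, s ≠ goal := by
          intro s hs
          have := List.find?_eq_none.mp hfind s hs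
          simpa using this
        obtain ⟨add, heq, hsrc, hcov, hnd⟩ := expand_outer (s0 :: fr) seen []
        have hstep : loopB goal (f + 1) (s0 :: fr) seen = loopB goal f add (seen ++ add) := by
          simp only [loopB, hfind, expandB, heq]
          simp
        rw [hstep]
        have inv' : InvB n m F arr goal add (seen ++ add) := by
          constructor
          · intro t ht
            obtain ⟨s, hs, hch⟩ := hsrc t ht
            exact Relation.ReflTransGen.tail (inv.reach s hs) hch
          · intro t ht; exact List.mem_append_right _ ht
          · exact List.mem_append_left _ inv.start
          · exact hnd inv.nodup
          · intro v hv
            rcases List.mem_append.mp hv with h | h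
            · exact inv.shape v h
            · obtain ⟨s, hs, hch⟩ := hsrc v h
              have hss := inv.shape s (inv.sub s hs)
              obtain ⟨hr, hp⟩ := childs_rect_perm hss.1 hch
              exact ⟨hr, hp.trans hss.2⟩
          · intro v hv
            rcases List.mem_append.mp hv with h | h
            · rcases inv.closedOr v h with hf | ⟨hgv, hcl⟩
              · exact Or.inr ⟨hng v hf, fun t ht => hcov v hf t ht⟩
              · exact Or.inr ⟨hgv, fun t ht => List.mem_append_left _ (hcl t ht)⟩
            · exact Or.inl h
        by_cases hadd : add = []
        · subst hadd
          right
          exact ⟨loopB_nil goal _ _, lemB_empty inv'⟩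
        · have h1 : 1 ≤ add.length := List.length_pos_iff.mpr hadd
          exact ih add (seen ++ add) inv' (by simp only [List.length_append]; omega)

theorem A_char {arr goal : List (List Int)} (hpre : Pre_DFS arr goal) :
    (DFS arr goal = some goal ∧ ReachP arr goal) ∨
    (DFS arr goal = none ∧ ¬ ReachP arr goal) := by
  obtain ⟨ha, hgr, _⟩ := hpre
  unfold DFS
  rw [show (PySem.Set.empty : List (List (List Int))) = [] from rfl]
  refine lemA (F := arr.flatten) hgr _ [(arr, 0)] [] ?_ ?_
  · constructor
    · intro p hp
      have : p = (arr, 0) := List.mem_singleton.mp hp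
      rw [this]
      exact Relation.ReflTransGen.refl
    · intro v hv; simp at hv
    · exact Or.inl ⟨(arr, 0), List.mem_singleton.mpr rfl, rfl⟩
    · exact List.nodup_nil
    · intro p hp
      have : p = (arr, 0) := List.mem_singleton.mp hp
      rw [this]
      exact ⟨ha, List.Perm.refl _⟩
    · intro v hv; simp at hv
    · intro pre e post hsp hev t ht; simp at hev
    · intro v hv; simp at hv
  · simp only [List.length_singleton, List.length_nil, Nat.sub_zero]
    omega

theorem B_char {arr goal : List (List Int)} (hpre : Pre_DFS arr goal) :
    (DFS_alt arr goal = some goal ∧ ReachP arr goal) ∨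
    (DFS_alt arr goal = none ∧ ¬ ReachP arr goal) := by
  obtain ⟨ha, hgr, _⟩ := hpre
  unfold DFS_alt
  rw [show PySem.Set.add (PySem.Set.empty : List (List (List Int))) arr = [arr] from rfl]
  refine lemB (n := arr.length) (m := (arr.headD []).length) (F := arr.flatten)
    _ [arr] [arr] ?_ ?_
  · constructor
    · intro t ht
      rw [List.mem_singleton.mp ht]
      exact Relation.ReflTransGen.refl
    · intro t ht; exact ht
    · exact List.mem_singleton.mpr rfl
    · exact List.nodup_singleton _
    · intro v hv
      rw [List.mem_singleton.mp hv]
      exact ⟨ha, List.Perm.refl _⟩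
    · intro v hv
      exact Or.inl hv
  · simp only [List.length_singleton]
    omega

-- ===== VERDICT (by name: the statement is the Claim_ definition above) =====
theorem DFS_spec : Claim_equal_DFS := by
  intro arr goal _ hpre
  unfold Spec_DFS
  rcases A_char hpre with ⟨ha, hr⟩ | ⟨ha, hr⟩ <;>
    rcases B_char hpre with ⟨hb, hr'⟩ | ⟨hb, hr'⟩
  · rw [ha, hb]
  · exact absurd hr hr'
  · exact absurd hr' hr
  · rw [ha, hb]
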